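-- pv_equiv track=rewrite | github.com/JaehoonSong12/ydjs-projects | coding-python/ap_quiz_package02.py | scoresSpecial
-- ===== SOURCE A (Python) =====
-- def scoresSpecial(a: list[int], b: list[int]) -> int:
--     """
--     Description:
--         Given two arrays of non-negative integer scores, a "special"
--         score is one which is a multiple of 10
--         (e.g., 40 or 90). Return the sum of the largest special score
--         in array `a` plus the largest special
--         score in array `b`.
--
--     Examples:
--         scoresSpecial([12, 10, 4], [2, 20, 30]) → 40
--         scoresSpecial([20, 10, 4], [2, 20, 10]) → 40
--         scoresSpecial([12, 11, 4], [2, 20, 31]) → 20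
--         scoresSpecial([1, 20, 2, 50], [3, 4, 5]) → 50
--         scoresSpecial([10, 4, 20, 30], [30, 20, 99]) → 60
--
--     Instructions to run the tests via the CLI:
--         1. Open your terminal or command prompt.
--         2. Run the tests by executing: `python q15.py`
--
--     Args:
--         a (list[int]): First list of non-negative scores.
--         b (list[int]): Second list of non-negative scores.
--
--     Returns:
--         int: Sum of the largest multiple-of-10 in `a` and the largest multiple-of-10 in `b`.
--     """
--     def max_special(scores: list[int]) -> int:
--         """
--         Helper:
--             Finds the largest "special" score (a multiple of 10) in the given list.
--             Returns 0 if there are no multiples of 10.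
--         """
--         i = 0
--         specials = []
--         while i < len(scores):
--             if scores[i] % 10 == 0:
--                 specials.append(scores[i])
--             i += 1
--         i = 0
--         if specials == []:
--             return 0
--         maximum = specials[0]
--         while i < len(specials):
--             if specials[i] > maximum:
--                 maximum = specials[i]
--             i += 1
--         return maximum
--     ### [Your Implementation Here]
--     sum_of_specials = max_special(a) + max_special(b)
--     return sum_of_specials
--     # Case-1. If the question can be solved with 'iteration (for/while)',
--     # design the most efficient algorithm.
--
--     # Case-2. If the question can be solved with 'recursion', design a
--     # correct algorithm. Since the recursion can be inefficient, use
--     # either 'tabulation' or 'memorization' to break it down into 'iteration'.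
--     return None
-- ===== SOURCE B (Python) =====
-- def scoresSpecial(a: list[int], b: list[int]) -> int:
--     def best(scores: list[int]) -> int:
--         m = None
--         for x in scores:
--             if x % 10 == 0 and (m is None or x > m):
--                 m = x
--         return 0 if m is None else m
--     return best(a) + best(b)
-- ===== Notes on version B (the rewrite author's own statement) =====
-- stated objective: faster
-- what changed: Replaced A's two-pass helper (index-driven while loop building a filtered intermediate list, then a second while loop over it for the maximum) with a single pass over each list maintaining an optional running best, updated when an element is a multiple of 10 and beats the current best; no intermediate list is built.
import Mathlib
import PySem

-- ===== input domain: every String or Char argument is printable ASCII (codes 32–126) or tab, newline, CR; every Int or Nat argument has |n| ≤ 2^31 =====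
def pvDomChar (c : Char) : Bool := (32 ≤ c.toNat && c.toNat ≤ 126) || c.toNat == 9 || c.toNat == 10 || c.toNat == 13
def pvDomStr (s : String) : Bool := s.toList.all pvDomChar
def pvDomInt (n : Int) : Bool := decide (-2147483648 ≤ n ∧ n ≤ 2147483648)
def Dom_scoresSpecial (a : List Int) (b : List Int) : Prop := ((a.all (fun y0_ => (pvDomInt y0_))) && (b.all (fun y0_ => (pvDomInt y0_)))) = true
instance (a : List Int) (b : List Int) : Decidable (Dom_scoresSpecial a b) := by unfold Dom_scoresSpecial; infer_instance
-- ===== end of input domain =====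

-- B collapses A's two passes (filter to a list, then max over it) into one pass with an optional running best.

-- ===== PORT A =====
-- first while loop of max_special: collect the multiples of 10 in order
def pvCollectA : List Int → List Int
  | [] => []
  | x :: rest => if PySem.Int.mod x 10 = 0 then x :: pvCollectA rest else pvCollectA rest

-- second while loop of max_special: running maximum over specials
def pvMaxLoopA (m : Int) : List Int → Int
  | [] => m
  | x :: rest => pvMaxLoopA (if x > m then x else m) rest

def pvMaxSpecialA (scores : List Int) : Int :=
  let specials := pvCollectA scores
  match specials with
  | [] => 0
  | m0 :: _ => pvMaxLoopA m0 specials   -- Python restarts i at 0, so the loop runs over all of specials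

def scoresSpecial (a : List Int) (b : List Int) : Int :=
  pvMaxSpecialA a + pvMaxSpecialA b

-- ===== PORT B =====
def pvBestStep (m : Option Int) (x : Int) : Option Int :=
  if PySem.Int.mod x 10 = 0 ∧ (m.isNone ∨ x > m.getD 0) then some x else m

def pvBest (scores : List Int) : Int :=
  match scores.foldl pvBestStep none with
  | none => 0
  | some m => m

def scoresSpecial_alt (a : List Int) (b : List Int) : Int :=
  pvBest a + pvBest b

-- ===== PRECONDITION & SPEC =====
def Spec_scoresSpecial (a : List Int) (b : List Int) (out : Int) : Prop := out = scoresSpecial_alt a b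
instance (a : List Int) (b : List Int) (out : Int) : Decidable (Spec_scoresSpecial a b out) := by unfold Spec_scoresSpecial; infer_instance

-- ===== CLAIM (what is proved, stated in full; the proofs are below) =====
def Claim_equal_scoresSpecial : Prop := ∀ (a : List Int) (b : List Int), Dom_scoresSpecial a b → Spec_scoresSpecial a b (scoresSpecial a b)

-- ===== LEMMAS AND PROOFS =====

theorem pvBest_fold_some (l : List Int) (m : Int) :
    l.foldl pvBestStep (some m) = some (pvMaxLoopA m (pvCollectA l)) := by
  induction l generalizing m with
  | nil => simp [pvCollectA, pvMaxLoopA]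
  | cons x rest ih =>
    by_cases hs : (10 : Int) ∣ x
    · by_cases hx : m < x
      · simp [pvBestStep, pvCollectA, pvMaxLoopA, hs, hx, ih]
      · simp [pvBestStep, pvCollectA, pvMaxLoopA, hs, hx, ih]
    · simp [pvBestStep, pvCollectA, hs, ih]

theorem pvMaxLoopA_self (m : Int) (l : List Int) :
    pvMaxLoopA m (m :: l) = pvMaxLoopA m l := by
  simp [pvMaxLoopA]

theorem pvBest_eq (l : List Int) : pvBest l = pvMaxSpecialA l := by
  unfold pvBest pvMaxSpecialA
  induction l with
  | nil => simp [pvCollectA]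
  | cons x rest ih =>
    by_cases hs : (10 : Int) ∣ x
    · simp only [List.foldl_cons]
      have h1 : pvBestStep none x = some x := by simp [pvBestStep, hs]
      rw [h1, pvBest_fold_some]
      have h2 : pvCollectA (x :: rest) = x :: pvCollectA rest := by
        simp [pvCollectA, hs]
      rw [h2]
      simp [pvMaxLoopA_self]
    · have h1 : pvBestStep none x = none := by simp [pvBestStep, hs]
      have h2 : pvCollectA (x :: rest) = pvCollectA rest := by
        simp [pvCollectA, hs]
      simp only [List.foldl_cons, h1, h2]
      exact ih

-- ===== VERDICT (by name: the statement is the Claim_ definition above) =====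
theorem scoresSpecial_spec : Claim_equal_scoresSpecial := by
  intro a b _
  unfold Spec_scoresSpecial scoresSpecial scoresSpecial_alt
  rw [pvBest_eq, pvBest_eq]
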